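-- pv_equiv track=rewrite | github.com/mariuszfilip/appriori_python | appriori/appriori.py | sequences_contain_same_items
-- ===== SOURCE A (Python) =====
-- import collections
--
-- def sequences_contain_same_items(a, b):
--     if collections.Counter(a) != collections.Counter(b):
--         return False
--     for item in a:
--         try:
--             i = b.index(item)
--         except ValueError:
--             return False
--         if b[i] != a[i]:
--             return False
--     return True
-- ===== SOURCE B (Python) =====
-- import collections
--
-- def sequences_contain_same_items(a, b):
--     if collections.Counter(a) != collections.Counter(b):
--         return False
--     seen = set()
--     for x, y in zip(a, b):
--         if y not in seen:
--             seen.add(y)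
--             if x != y:
--                 return False
--     return True
-- ===== Notes on version B (the rewrite author's own statement) =====
-- stated objective: alternative
-- what changed: The per-item b.index scan with an i-th element recheck is replaced by a single pass over zip(a,b) that tracks a 'seen' set of b-values and compares a[i] to b[i] only at each value's first occurrence in b.
import Mathlib
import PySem

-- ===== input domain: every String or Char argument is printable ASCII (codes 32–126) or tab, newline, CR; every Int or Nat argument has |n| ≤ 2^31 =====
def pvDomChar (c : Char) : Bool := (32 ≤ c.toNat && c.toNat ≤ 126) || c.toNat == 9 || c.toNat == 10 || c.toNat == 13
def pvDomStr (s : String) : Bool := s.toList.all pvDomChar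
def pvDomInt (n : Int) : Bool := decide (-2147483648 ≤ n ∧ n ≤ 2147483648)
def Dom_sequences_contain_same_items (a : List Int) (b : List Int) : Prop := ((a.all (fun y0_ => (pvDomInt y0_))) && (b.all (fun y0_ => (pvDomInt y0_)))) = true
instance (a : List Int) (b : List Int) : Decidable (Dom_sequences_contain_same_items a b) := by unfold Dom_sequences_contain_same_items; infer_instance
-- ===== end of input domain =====

-- B replaces the per-item b.index scans with a single pass over zip(a,b) tracking a seen-set of b-values.


-- ===== PORT A =====
-- Python dict '==' (order-ignoring) on the two Counters: same keys, same counts.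
def pyCounterEq (x y : PySem.Dict Int Int) : Bool :=
  (x.keys.all (fun k => y.contains k && (y.getD k 0 == x.getD k 0))) &&
  (y.keys.all (fun k => x.contains k))

-- 'for item in a: i = b.index(item) (ValueError → False); if b[i] != a[i]: False'.
-- The pyGet? comparison is exact here: index? gives i < |b|, and the Counter guard has
-- ensured |a| = |b|, so both lookups are 'some' wherever this loop runs in A.
def seqLoopA (a b : List Int) : List Int → Bool
  | [] => true
  | item :: rest =>
    match PySem.List.index? b item with
    | none => false
    | some i =>
      if PySem.List.pyGet? b (i : Int) ≠ PySem.List.pyGet? a (i : Int) then false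
      else seqLoopA a b rest

def sequences_contain_same_items (a : List Int) (b : List Int) : Bool :=
  if !(pyCounterEq (PySem.Dict.counter a) (PySem.Dict.counter b)) then false
  else seqLoopA a b a

-- ===== PORT B =====
-- 'for x, y in zip(a, b): if y not in seen: seen.add(y); if x != y: return False'
def seqLoopB (seen : PySem.Set Int) : List (Int × Int) → Bool
  | [] => true
  | (x, y) :: rest =>
    if PySem.Set.contains seen y then seqLoopB seen rest
    else if x ≠ y then false
    else seqLoopB (PySem.Set.add seen y) rest

def sequences_contain_same_items_alt (a : List Int) (b : List Int) : Bool :=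
  if !(pyCounterEq (PySem.Dict.counter a) (PySem.Dict.counter b)) then false
  else seqLoopB PySem.Set.empty (a.zip b)

-- ===== PRECONDITION & SPEC =====
def Spec_sequences_contain_same_items (a : List Int) (b : List Int) (out : Bool) : Prop := out = sequences_contain_same_items_alt a b
instance (a : List Int) (b : List Int) (out : Bool) : Decidable (Spec_sequences_contain_same_items a b out) := by unfold Spec_sequences_contain_same_items; infer_instance

-- ===== CLAIM (what is proved, stated in full; the proofs are below) =====
def Claim_equal_sequences_contain_same_items : Prop := ∀ (a : List Int) (b : List Int), Dom_sequences_contain_same_items a b → Spec_sequences_contain_same_items a b (sequences_contain_same_items a b)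

-- ===== LEMMAS AND PROOFS =====

-- A's loop returns true iff every item of l passes its first-occurrence check against b.
lemma seqLoopA_iff (a b l : List Int) :
    seqLoopA a b l = true ↔
      ∀ v ∈ l, ∃ i, PySem.List.index? b v = some i ∧
        PySem.List.pyGet? b (i : Int) = PySem.List.pyGet? a (i : Int) := by
  induction l with
  | nil => simp [seqLoopA]
  | cons v rest ih =>
    simp only [seqLoopA]
    cases h : PySem.List.index? b v with
    | none =>
      simp only [Bool.false_eq_true, false_iff]
      intro H
      obtain ⟨i, hi, -⟩ := H v (List.mem_cons_self ..)
      rw [hi] at h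
      cases h
    | some i =>
      show (if PySem.List.pyGet? b (i : Int) ≠ PySem.List.pyGet? a (i : Int) then false
        else seqLoopA a b rest) = true ↔ _
      by_cases hg : PySem.List.pyGet? b (i : Int) = PySem.List.pyGet? a (i : Int)
      · rw [if_neg (not_not_intro hg), ih]
        constructor
        · intro H w hw
          rcases List.mem_cons.1 hw with rfl | hw
          · exact ⟨i, h, hg⟩
          · exact H w hw
        · intro H w hw
          exact H w (List.mem_cons_of_mem _ hw)
      · rw [if_pos hg]
        simp only [Bool.false_eq_true, false_iff]
        intro H
        obtain ⟨i', hi', hg'⟩ := H v (List.mem_cons_self ..)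
        rw [h] at hi'
        cases hi'
        exact hg hg'

-- B's loop returns true iff every pair whose second component is fresh (not in seen,
-- not earlier in the list) has equal components.
lemma seqLoopB_iff (l : List (Int × Int)) (seen : PySem.Set Int) :
    seqLoopB seen l = true ↔
      ∀ i (h : i < l.length),
        (l[i].2 ∉ seen ∧ ∀ j (hj : j < i), (l[j]'(Nat.lt_trans hj h)).2 ≠ l[i].2) →
        l[i].1 = l[i].2 := by
  induction l generalizing seen with
  | nil => simp [seqLoopB]
  | cons hd tl ih =>
    obtain ⟨x, y⟩ := hd
    simp only [seqLoopB]
    by_cases hy : y ∈ seen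
    · have hc : PySem.Set.contains seen y = true := by
        simpa [PySem.Set.contains] using hy
      rw [if_pos hc, ih]
      constructor
      · intro H i hi hcond
        obtain ⟨hns, hfst⟩ := hcond
        cases i with
        | zero => exact absurd hy (by simpa using hns)
        | succ i =>
          apply H i (by simpa using hi)
          refine ⟨by simpa using hns, ?_⟩
          intro j hj
          simpa using hfst (j + 1) (by omega)
      · intro H i hi hcond
        obtain ⟨hns, hfst⟩ := hcond
        apply H (i + 1) (by simpa using hi)
        refine ⟨by simpa using hns, ?_⟩
        intro j hj
        cases j with
        | zero =>
          simp only [List.getElem_cons_zero, List.getElem_cons_succ]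
          intro he
          exact hns (by rw [← he]; exact hy)
        | succ j => simpa using hfst j (by omega)
    · have hc : ¬ (PySem.Set.contains seen y = true) := by
        simpa [PySem.Set.contains] using hy
      rw [if_neg hc]
      by_cases hxy : x = y
      · have hadd : PySem.Set.add seen y = seen ++ [y] := by
          simp only [PySem.Set.add]
          rw [if_neg hc]
        rw [if_neg (not_not_intro hxy), ih, hadd]
        constructor
        · intro H i hi hcond
          obtain ⟨hns, hfst⟩ := hcond
          cases i with
          | zero => simpa using hxy
          | succ i =>
            apply H i (by simpa using hi)
            constructor
            · simp only [List.mem_append, List.mem_singleton]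
              rintro (h | h)
              · exact absurd h (by simpa using hns)
              · have h0 := hfst 0 (by omega)
                simp only [List.getElem_cons_zero, List.getElem_cons_succ] at h0
                exact h0 h.symm
            · intro j hj
              simpa using hfst (j + 1) (by omega)
        · intro H i hi hcond
          obtain ⟨hns, hfst⟩ := hcond
          simp only [List.mem_append, List.mem_singleton, not_or] at hns
          apply H (i + 1) (by simpa using hi)
          constructor
          · simpa using hns.1
          · intro j hj
            cases j with
            | zero =>
              simp only [List.getElem_cons_zero, List.getElem_cons_succ]
              intro he
              exact hns.2 he.symm
            | succ j => simpa using hfst j (by omega)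
      · rw [if_pos hxy]
        simp only [Bool.false_eq_true, false_iff]
        intro H
        have h0 := H 0 (by simp)
          ⟨by simpa using hy, fun j hj => absurd hj (Nat.not_lt_zero j)⟩
        exact hxy (by simpa using h0)

-- The Counter guard holds iff a and b agree on every count.
lemma pyCounterEq_iff (a b : List Int) :
    pyCounterEq (PySem.Dict.counter a) (PySem.Dict.counter b) = true ↔
      ∀ v : Int, a.count v = b.count v := by
  simp only [pyCounterEq, Bool.and_eq_true, List.all_eq_true,
    PySem.Dict.keys_counter, PySem.Dict.contains_counter, PySem.Dict.getD_counter]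
  constructor
  · rintro ⟨h1, h2⟩ v
    by_cases hv : v ∈ a
    · have := h1 v (by simpa [PySem.Set.mem_ofList] using hv)
      simp only [beq_iff_eq] at this
      exact_mod_cast this.2.symm
    · have hvb : v ∉ b := by
        intro hb
        have := h2 v (by simpa [PySem.Set.mem_ofList] using hb)
        simp only [List.contains_eq_mem, decide_eq_true_eq] at this
        exact hv this
      simp [List.count_eq_zero_of_not_mem hv, List.count_eq_zero_of_not_mem hvb]
  · intro h
    refine ⟨?_, ?_⟩
    · intro k hk
      have hk' : k ∈ a := by simpa [PySem.Set.mem_ofList] using hk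
      have hpos : 0 < b.count k := by
        rw [← h k]
        exact List.count_pos_iff.2 hk'
      have hkb : k ∈ b := List.count_pos_iff.1 hpos
      simp [hkb, h k]
    · intro k hk
      have hk' : k ∈ b := by simpa [PySem.Set.mem_ofList] using hk
      have hpos : 0 < a.count k := by
        rw [h k]
        exact List.count_pos_iff.2 hk'
      simpa using List.count_pos_iff.1 hpos

-- Under equal counts the two loops agree.
lemma loops_agree (a b : List Int) (hc : ∀ v : Int, a.count v = b.count v) :
    seqLoopA a b a = seqLoopB PySem.Set.empty (a.zip b) := by
  have hlen : a.length = b.length := (List.perm_iff_count.2 hc).length_eq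
  have hmem : ∀ v : Int, v ∈ a ↔ v ∈ b := by
    intro v
    rw [← List.count_pos_iff, ← List.count_pos_iff, hc v]
  rw [Bool.eq_iff_iff, seqLoopA_iff, seqLoopB_iff]
  constructor
  · intro H i hi hcond
    obtain ⟨-, hfst⟩ := hcond
    have hib : i < b.length := by
      rw [List.length_zip, hlen] at hi
      omega
    have hia : i < a.length := by omega
    simp only [List.getElem_zip] at hfst ⊢
    have hvb : b[i] ∈ b := List.getElem_mem hib
    obtain ⟨i', hidx, hget⟩ := H b[i] ((hmem b[i]).2 hvb)
    obtain ⟨hi'lt, hbeq, hmin⟩ := PySem.List.getElem_of_index?_eq_some hidx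
    have hii : i' = i := by
      by_contra hne
      rcases Nat.lt_or_ge i' i with hlt | hge
      · exact hfst i' hlt hbeq
      · exact hmin i (by omega) rfl
    subst hii
    rw [PySem.List.pyGet?_natCast, PySem.List.pyGet?_natCast] at hget
    rw [List.getElem?_eq_getElem hi'lt, List.getElem?_eq_getElem hia] at hget
    exact (Option.some_injective _ hget).symm
  · intro H v hv
    have hvb : v ∈ b := (hmem v).1 hv
    obtain ⟨i, hidx⟩ := Option.isSome_iff_exists.1
      ((PySem.List.index?_isSome_iff b v).2 hvb)
    obtain ⟨hilt, hbeq, hmin⟩ := PySem.List.getElem_of_index?_eq_some hidx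
    refine ⟨i, hidx, ?_⟩
    have hia : i < a.length := by omega
    have hiz : i < (a.zip b).length := by
      rw [List.length_zip]
      omega
    have hab := H i hiz ⟨by simp [PySem.Set.empty], ?_⟩
    · simp only [List.getElem_zip] at hab
      have hab' : a[i]'hia = b[i]'hilt := hab
      rw [PySem.List.pyGet?_natCast, PySem.List.pyGet?_natCast,
        List.getElem?_eq_getElem hilt, List.getElem?_eq_getElem hia, hab', hbeq]
    · intro j hj
      simp only [List.getElem_zip]
      intro he
      exact hmin j (by omega) (by rw [he, hbeq])

-- ===== VERDICT (by name: the statement is the Claim_ definition above) =====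
theorem sequences_contain_same_items_spec : Claim_equal_sequences_contain_same_items := by
  intro a b _
  unfold Spec_sequences_contain_same_items
  unfold sequences_contain_same_items sequences_contain_same_items_alt
  by_cases hg : pyCounterEq (PySem.Dict.counter a) (PySem.Dict.counter b) = true
  · rw [hg]
    simp only [Bool.not_true, Bool.false_eq_true, if_false]
    exact loops_agree a b ((pyCounterEq_iff a b).1 hg)
  · rw [Bool.not_eq_true] at hg
    rw [hg]
    simp
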